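-- pv_equiv track=rewrite | github.com/pypi-data/pypi-mirror-339 | packages/maleo-core/maleo_core-0.2.82.tar.gz/maleo_core-0.2.82/maleo_core/utils/serializer.py | build_nested_expand_structure
-- ===== SOURCE A (Python) =====
-- from collections import defaultdict
--
-- def build_nested_expand_structure(expand:set[str]) -> dict[str, set[str]]:
--     """
--     Turn set like {'profile.gender', 'user_type'} into:
--     {
--         'profile': {'gender'},
--         'user_type': set()
--     }
--     """
--     nested = defaultdict(set)
--     for item in expand:
--         if "." in item:
--             parent, child = item.split(".", 1)
--             nested[parent].add(child)
--         else:
--             nested[item]  #* empty set means expand whole field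
--     return dict(nested)
-- ===== SOURCE B (Python) =====
-- def build_nested_expand_structure(expand):
--     items = list(expand)
--     # stage 1: the distinct parent keys, in first-occurrence order
--     parents = []
--     for it in items:
--         p = it.split(".", 1)[0]
--         if p not in parents:
--             parents.append(p)
--     # stage 2: per parent, gather its children by a comprehension scan over all items
--     return {p: {it.split(".", 1)[1]
--                 for it in items
--                 if "." in it and it.split(".", 1)[0] == p}
--             for p in parents}
-- ===== Notes on version B (the rewrite author's own statement) =====
-- stated objective: alternative
-- what changed: A accumulates everything in a single branching defaultdict pass; B first computes the ordered distinct parent-key list, then builds the dict by a per-parent set comprehension that rescans all items for that parent's children (grouping by repeated scan instead of incremental dict updates).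
import Mathlib
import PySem

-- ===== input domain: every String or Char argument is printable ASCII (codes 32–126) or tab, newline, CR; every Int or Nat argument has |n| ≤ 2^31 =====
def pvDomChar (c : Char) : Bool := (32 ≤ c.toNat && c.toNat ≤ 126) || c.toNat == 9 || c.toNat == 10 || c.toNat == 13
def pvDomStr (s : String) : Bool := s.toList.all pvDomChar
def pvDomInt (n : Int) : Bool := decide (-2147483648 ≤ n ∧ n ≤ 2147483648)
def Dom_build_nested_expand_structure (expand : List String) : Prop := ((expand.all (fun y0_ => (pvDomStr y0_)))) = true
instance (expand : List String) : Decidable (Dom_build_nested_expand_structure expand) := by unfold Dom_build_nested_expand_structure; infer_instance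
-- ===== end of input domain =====

-- B replaces A's single incremental defaultdict pass by grouping-by-rescan: first the ordered
-- distinct parent-key list, then per parent a set comprehension collecting its children;
-- objective: alternative algorithm (same results, different traversal).
-- The input is a Python set, modelled as a List String of distinct elements; per convention
-- the returned dict is an insertion-ordered association list with set values as distinct-element lists.

-- shared helper: item.split(".", 1) (both Pythons call this same builtin)
def pvSplit1 (item : String) : List String := (PySem.Str.splitMax? item "." 1).getD [item]
-- item.split(".", 1)[0]
def pvParent (item : String) : String := (pvSplit1 item).headD item
-- item.split(".", 1)[1]  (only used when "." is in item, so the list has two elements)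
def pvChild (item : String) : String := ((pvSplit1 item).drop 1).headD ""

-- ===== PORT A =====
def build_nested_expand_structure (expand : List String) : List (String × List String) :=
  (expand.foldl
    (fun nested item =>
      if PySem.Str.isIn "." item then
        -- parent, child = item.split(".", 1); nested[parent].add(child)  (defaultdict(set))
        nested.insert (pvParent item)
          (PySem.Set.add (nested.getD (pvParent item) PySem.Set.empty) (pvChild item))
      else
        -- nested[item]: a defaultdict access inserts an empty set iff the key is absent
        nested.setdefault item PySem.Set.empty)
    PySem.Dict.empty).items

-- ===== PORT B =====
def build_nested_expand_structure_alt (expand : List String) : List (String × List String) :=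
  -- stage 1: parents = distinct item.split(".", 1)[0] in first-occurrence order
  let parents := expand.foldl
    (fun ps it => if ps.contains (pvParent it) then ps else ps ++ [pvParent it]) []
  -- stage 2: {p: {child of it | it dotted, parent of it == p} for p in parents}
  parents.map (fun p =>
    (p, expand.foldl
      (fun s it =>
        if PySem.Str.isIn "." it && (pvParent it == p) then PySem.Set.add s (pvChild it) else s)
      PySem.Set.empty))

-- ===== PRECONDITION & SPEC =====
def Spec_build_nested_expand_structure (expand : List String) (out : List (String × List String)) : Prop := out = build_nested_expand_structure_alt expand
instance (expand : List String) (out : List (String × List String)) : Decidable (Spec_build_nested_expand_structure expand out) := by unfold Spec_build_nested_expand_structure; infer_instance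

-- ===== CLAIM (what is proved, stated in full; the proofs are below) =====
def Claim_equal_build_nested_expand_structure : Prop := ∀ (expand : List String), Dom_build_nested_expand_structure expand → Spec_build_nested_expand_structure expand (build_nested_expand_structure expand)

-- ===== LEMMAS AND PROOFS =====

-- the loop bodies, named for the proofs
def pvStepA (nested : PySem.Dict String (PySem.Set String)) (item : String) :
    PySem.Dict String (PySem.Set String) :=
  if PySem.Str.isIn "." item then
    nested.insert (pvParent item)
      (PySem.Set.add (nested.getD (pvParent item) PySem.Set.empty) (pvChild item))
  else nested.setdefault item PySem.Set.empty

def pvPar (ps : List String) (it : String) : List String :=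
  if ps.contains (pvParent it) then ps else ps ++ [pvParent it]

def pvParentsOf (xs : List String) : List String := xs.foldl pvPar []

def pvChStep (p : String) (s : PySem.Set String) (it : String) : PySem.Set String :=
  if PySem.Str.isIn "." it && (pvParent it == p) then PySem.Set.add s (pvChild it) else s

def pvChildrenOf (xs : List String) (p : String) : PySem.Set String :=
  xs.foldl (pvChStep p) PySem.Set.empty

-- splitOnMax.go walks the whole string when the separator never occurs
theorem pv_go_no_sep (sep : List Char) (fuel : Nat) :
    ∀ (m : Nat) (l cur : List Char) (acc : List (List Char)),
    ¬ sep <:+: l →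
    PySem.Chars.splitOnMax.go sep fuel m l cur acc = ((cur.reverse ++ l) :: acc).reverse := by
  induction fuel with
  | zero =>
    intro m l cur acc _
    simp [PySem.Chars.splitOnMax.go]
  | succ fuel ih =>
    intro m l cur acc h
    cases l with
    | nil => simp [PySem.Chars.splitOnMax.go]
    | cons c rest =>
      have hpre : sep.isPrefixOf (c :: rest) = false := by
        by_contra hcon
        exact h ((List.isPrefixOf_iff_prefix.mp (by simpa using hcon)).isInfix)
      by_cases hm : m = 0
      · simp [PySem.Chars.splitOnMax.go, hm]
      · have hrest : ¬ sep <:+: rest := fun hc => h (hc.trans (List.suffix_cons c rest).isInfix)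
        simp only [PySem.Chars.splitOnMax.go, hm, hpre, if_false]
        rw [ih m rest (c :: cur) acc hrest]
        simp

-- Str.isIn on the literal separator, in the List Char form the unfolded goals show
theorem pv_isIn_chars (x : String) : PySem.Str.isIn "." x = PySem.Chars.isIn ['.'] x.toList := rfl

theorem pvChStep_ne (q : String) (s : PySem.Set String) (x : String)
    (h : pvParent x ≠ q) : pvChStep q s x = s := by
  unfold pvChStep
  have hb : (pvParent x == q) = false := by simpa using h
  simp [hb]

theorem pvChStep_no_dot (q : String) (s : PySem.Set String) (x : String)
    (h : PySem.Str.isIn "." x = false) : pvChStep q s x = s := by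
  unfold pvChStep
  have h' : PySem.Chars.isIn ['.'] x.toList = false := pv_isIn_chars x ▸ h
  simp [h']

theorem pvChStep_self (s : PySem.Set String) (x : String)
    (hx : PySem.Str.isIn "." x = true) :
    pvChStep (pvParent x) s x = PySem.Set.add s (pvChild x) := by
  unfold pvChStep
  have h' : PySem.Chars.isIn ['.'] x.toList = true := pv_isIn_chars x ▸ hx
  simp [h']

theorem pvParent_of_no_dot (x : String) (h : PySem.Str.isIn "." x = false) :
    pvParent x = x := by
  have hinf : ¬ (".".toList <:+: x.toList) :=
    (PySem.Chars.isIn_eq_false_iff _ _).mp (by simpa [PySem.Str.isIn] using h)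
  unfold pvParent pvSplit1 PySem.Str.splitMax? PySem.Chars.splitMax? PySem.Chars.splitOnMax
  rw [if_neg (by simp), if_neg (by norm_num), pv_go_no_sep _ _ _ _ _ _ hinf]
  simp

-- parents bookkeeping
theorem pv_acc_sub (xs : List String) : ∀ (acc : List String) (a : String),
    a ∈ acc → a ∈ xs.foldl pvPar acc := by
  induction xs with
  | nil => intro acc a h; simpa using h
  | cons x xs ih =>
    intro acc a h
    refine ih (pvPar acc x) a ?_
    unfold pvPar
    split_ifs with hc
    · exact h
    · exact List.mem_append_left _ h

theorem pv_mem_parents (xs : List String) : ∀ (acc : List String) (it : String),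
    it ∈ xs → pvParent it ∈ xs.foldl pvPar acc := by
  induction xs with
  | nil => intro _ _ h; simp at h
  | cons x xs ih =>
    intro acc it h
    rcases List.mem_cons.mp h with h | h
    · subst h
      refine pv_acc_sub xs (pvPar acc it) _ ?_
      unfold pvPar
      split_ifs with hc
      · exact (List.contains_iff_mem).mp hc
      · exact List.mem_append_right _ (by simp)
    · exact ih (pvPar acc x) it h

theorem pv_parents_nodup (xs : List String) : ∀ (acc : List String),
    acc.Nodup → (xs.foldl pvPar acc).Nodup := by
  induction xs with
  | nil => intro acc h; simpa using h
  | cons x xs ih =>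
    intro acc h
    refine ih (pvPar acc x) ?_
    unfold pvPar
    split_ifs with hc
    · exact h
    · have : pvParent x ∉ acc := by
        intro hmem; exact hc ((List.contains_iff_mem).mpr hmem)
      exact h.append (List.nodup_singleton _)
        (fun a ha hax => this (List.mem_singleton.mp hax ▸ ha))

theorem pv_children_empty (p : String) (xs : List String)
    (h : ∀ it ∈ xs, pvParent it ≠ p) :
    ∀ (s : PySem.Set String), xs.foldl (pvChStep p) s = s := by
  induction xs with
  | nil => intro s; rfl
  | cons x xs ih =>
    intro s
    rw [List.foldl_cons, pvChStep_ne p s x (h x (by simp))]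
    exact ih (fun it hit => h it (by simp [hit])) s

-- the invariant: A's dict items are exactly B's parents list paired with B's children scans
theorem pvInv (xs : List String) :
    (List.foldl pvStepA PySem.Dict.empty xs).items
      = (pvParentsOf xs).map (fun p => (p, pvChildrenOf xs p)) := by
  induction xs using List.reverseRecOn with
  | nil => rfl
  | append_singleton xs x ih =>
    have hP : pvParentsOf (xs ++ [x]) = pvPar (pvParentsOf xs) x := by
      unfold pvParentsOf; rw [List.foldl_append]; rfl
    have hC : ∀ p, pvChildrenOf (xs ++ [x]) p = pvChStep p (pvChildrenOf xs p) x := by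
      intro p; unfold pvChildrenOf; rw [List.foldl_append]; rfl
    have hD : List.foldl pvStepA PySem.Dict.empty (xs ++ [x])
        = pvStepA (List.foldl pvStepA PySem.Dict.empty xs) x := by
      rw [List.foldl_append]; rfl
    set d := List.foldl pvStepA PySem.Dict.empty xs with hd
    set L := pvParentsOf xs with hL
    have hkeys : d.keys = L := by
      show d.items.map Prod.fst = L
      rw [ih, List.map_map]
      exact (List.map_congr_left fun p _ => rfl).trans (List.map_id L)
    have hnd : d.keys.Nodup := by
      rw [hkeys]; exact pv_parents_nodup xs [] (by simp)
    have hcontains : ∀ q, d.contains q = L.contains q := by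
      intro q
      by_cases hq : q ∈ L
      · rw [(PySem.Dict.contains_iff_mem_keys d q).mpr (hkeys ▸ hq),
          (List.contains_iff_mem).mpr hq]
      · have h1 : d.contains q = false := Bool.eq_false_iff.mpr (fun hc =>
          hq (hkeys ▸ (PySem.Dict.contains_iff_mem_keys d q).mp hc))
        have h2 : L.contains q = false := Bool.eq_false_iff.mpr (fun hc =>
          hq ((List.contains_iff_mem).mp hc))
        rw [h1, h2]
    rw [hD, hP]
    by_cases hx : PySem.Str.isIn "." x = true
    · -- dotted item: parent := pvParent x
      have hA : pvStepA d x
          = d.insert (pvParent x)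
              (PySem.Set.add (d.getD (pvParent x) PySem.Set.empty) (pvChild x)) := by
        unfold pvStepA; rw [if_pos hx]
      by_cases hp : pvParent x ∈ L
      · -- parent already present: overwrite in place
        have hpc : d.contains (pvParent x) = true := by
          rw [hcontains]; exact (List.contains_iff_mem).mpr hp
        have hgd : d.getD (pvParent x) PySem.Set.empty = pvChildrenOf xs (pvParent x) := by
          refine PySem.Dict.getD_of_mem_items d ?_ hnd _
          rw [ih]
          exact List.mem_map.mpr ⟨pvParent x, hp, rfl⟩
        have hPar : pvPar L x = L := by
          unfold pvPar; rw [if_pos ((List.contains_iff_mem).mpr hp)]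
        rw [hA, PySem.Dict.items_insert_of_contains _ _ hpc, ih, List.map_map, hPar]
        refine List.map_congr_left (fun q _ => ?_)
        simp only [Function.comp_apply]
        by_cases hq : q = pvParent x
        · subst hq
          rw [hC, pvChStep_self _ _ hx, hgd]
          simp
        · have hq' : (q == pvParent x) = false := by simpa using hq
          rw [hC, pvChStep_ne _ _ _ (fun hcon => hq hcon.symm)]
          simp [hq']
      · -- fresh parent: appended
        have hpc : d.contains (pvParent x) = false := by
          rw [hcontains]
          exact Bool.eq_false_iff.mpr (fun hc => hp ((List.contains_iff_mem).mp hc))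
        have hPar : pvPar L x = L ++ [pvParent x] := by
          unfold pvPar
          rw [if_neg (fun hc => hp ((List.contains_iff_mem).mp hc))]
        have hce : pvChildrenOf xs (pvParent x) = PySem.Set.empty :=
          pv_children_empty _ xs
            (fun it hit hcon => hp (by rw [← hcon]; exact pv_mem_parents xs [] it hit)) _
        rw [hA, PySem.Dict.items_insert_of_not_contains _ _ hpc, ih, hPar, List.map_append]
        congr 1
        · refine List.map_congr_left (fun q hq => ?_)
          have hqne : pvParent x ≠ q := fun hcon => hp (hcon ▸ hq)
          rw [hC, pvChStep_ne _ _ _ hqne]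
        · simp only [List.map_cons, List.map_nil]
          rw [PySem.Dict.getD_of_not_contains _ _ hpc, hC, hce, pvChStep_self _ _ hx]
    · -- bare item: nested[item] with item = its own parent
      have hx' : PySem.Str.isIn "." x = false := by simpa using hx
      have hpx : pvParent x = x := pvParent_of_no_dot x hx'
      have hxc : PySem.Chars.isIn ['.'] x.toList = false := pv_isIn_chars x ▸ hx'
      have hA : pvStepA d x = d.setdefault x PySem.Set.empty := by
        unfold pvStepA; rw [if_neg (by simp [hxc])]
      have hCall : ∀ q, pvChStep q (pvChildrenOf xs q) x = pvChildrenOf xs q :=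
        fun q => pvChStep_no_dot q _ x hx'
      by_cases hp : x ∈ L
      · have hPar : pvPar L x = L := by
          unfold pvPar; rw [hpx, if_pos ((List.contains_iff_mem).mpr hp)]
        rw [hA, PySem.Dict.setdefault_of_contains _ _
            (by rw [hcontains]; exact (List.contains_iff_mem).mpr hp), ih, hPar]
        exact (List.map_congr_left (fun q _ => by rw [hC, hCall])).symm
      · have hpc : d.contains x = false := by
          rw [hcontains]
          exact Bool.eq_false_iff.mpr (fun hc => hp ((List.contains_iff_mem).mp hc))
        have hPar : pvPar L x = L ++ [x] := by
          unfold pvPar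
          rw [hpx, if_neg (fun hc => hp ((List.contains_iff_mem).mp hc))]
        have hce : pvChildrenOf xs x = PySem.Set.empty :=
          pv_children_empty _ xs
            (fun it hit hcon => hp (by rw [← hcon]; exact pv_mem_parents xs [] it hit)) _
        rw [hA, PySem.Dict.setdefault_of_not_contains _ _ hpc,
          PySem.Dict.items_insert_of_not_contains _ _ hpc, ih, hPar, List.map_append]
        congr 1
        · exact (List.map_congr_left (fun q _ => by rw [hC, hCall])).symm
        · simp only [List.map_cons, List.map_nil]
          rw [hC, hCall, hce]

-- ===== VERDICT (by name: the statement is the Claim_ definition above) =====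
theorem build_nested_expand_structure_spec : Claim_equal_build_nested_expand_structure := by
  intro expand _
  unfold Spec_build_nested_expand_structure
  show (List.foldl pvStepA PySem.Dict.empty expand).items
      = (pvParentsOf expand).map (fun p => (p, pvChildrenOf expand p))
  exact pvInv expand
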